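-- pv_equiv track=rewrite | github.com/xznhj8129/crsf-experiments-lain | crsfrecorder/crsf_tele_reader.py | trim_trailing_radio
-- ===== SOURCE A (Python) =====
-- def trim_trailing_radio(rows):
--     """Return rows up to the last non-RADIO_ID entry; discard RADIO_ID rows."""
--     last_idx = None
--     for i in range(len(rows) - 1, -1, -1):
--         if rows[i]["type"] != "RADIO_ID":
--             last_idx = i
--             break
--     if last_idx is None:
--         return []
--     cut = rows[: last_idx + 1]
--     return [r for r in cut if r["type"] != "RADIO_ID"]
-- ===== SOURCE B (Python) =====
-- def trim_trailing_radio(rows):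
--     """Return rows up to the last non-RADIO_ID entry; discard RADIO_ID rows."""
--     return [r for r in rows if r["type"] != "RADIO_ID"]
-- ===== Notes on version B (the rewrite author's own statement) =====
-- stated objective: simpler
-- what changed: Replaced the backward scan for the last non-RADIO_ID index plus slice plus filter with a single forward filter, which yields the same list since trailing rows dropped by the slice are all RADIO_ID rows the filter would drop anyway.
import Mathlib
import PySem

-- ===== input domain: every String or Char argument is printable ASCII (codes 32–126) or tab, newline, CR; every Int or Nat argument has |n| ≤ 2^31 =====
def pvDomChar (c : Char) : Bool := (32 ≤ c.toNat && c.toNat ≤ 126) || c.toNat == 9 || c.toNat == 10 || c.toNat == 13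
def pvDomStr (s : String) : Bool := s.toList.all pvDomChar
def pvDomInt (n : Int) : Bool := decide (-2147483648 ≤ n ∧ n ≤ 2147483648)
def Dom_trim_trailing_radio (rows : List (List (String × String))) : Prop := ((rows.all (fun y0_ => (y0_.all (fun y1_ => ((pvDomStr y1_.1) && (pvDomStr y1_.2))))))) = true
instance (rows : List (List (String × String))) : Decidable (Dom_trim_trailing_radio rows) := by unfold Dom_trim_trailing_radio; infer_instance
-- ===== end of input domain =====

-- B replaces A's backward scan + slice + filter by a single forward filter (simpler decomposition, same O(n) cost).


-- ===== PORT A =====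
-- r["type"]: first-match lookup in the association list; Pre_ guarantees the key is present,
-- so the "" default of getD is never the value actually used on admitted inputs.
def pvRowTy (r : List (String × String)) : String :=
  (((r.find? (fun p => p.1 == "type")).map Prod.snd).getD "")

-- the backward 'for i in range(len(rows)-1, -1, -1): … break' loop of A
def pvLastIdxA (rows : List (List (String × String))) : Nat → Option Nat
  | 0 => none
  | n+1 =>
    match PySem.List.pyGet? rows ((n : Int)) with
    | some r => if pvRowTy r ≠ "RADIO_ID" then some n else pvLastIdxA rows n
    | none => pvLastIdxA rows n

def trim_trailing_radio (rows : List (List (String × String))) : List (List (String × String)) :=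
  match pvLastIdxA rows rows.length with
  | none => []
  | some li =>
    (PySem.List.slice rows (some 0) (some ((li : Int) + 1))).filter
      (fun r => pvRowTy r ≠ "RADIO_ID")

-- ===== PORT B =====
def trim_trailing_radio_alt (rows : List (List (String × String))) : List (List (String × String)) :=
  rows.filter (fun r => pvRowTy r ≠ "RADIO_ID")

-- ===== PRECONDITION & SPEC =====
-- Pre_ excludes exactly the rows without a "type" key, on which the Python A (and B) raises KeyError.
def Pre_trim_trailing_radio (rows : List (List (String × String))) : Prop :=
  ∀ r ∈ rows, (r.find? (fun p => p.1 == "type")).isSome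
instance (rows : List (List (String × String))) : Decidable (Pre_trim_trailing_radio rows) := by
  unfold Pre_trim_trailing_radio; infer_instance
def pvWitness_trim_trailing_radio : (List (List (String × String))) :=
  [[("type", "GPS"), ("lat", "1")], [("type", "RADIO_ID")]]

def Spec_trim_trailing_radio (rows : List (List (String × String))) (out : List (List (String × String))) : Prop := out = trim_trailing_radio_alt rows
instance (rows : List (List (String × String))) (out : List (List (String × String))) : Decidable (Spec_trim_trailing_radio rows out) := by unfold Spec_trim_trailing_radio; infer_instance

-- ===== CLAIM (what is proved, stated in full; the proofs are below) =====
def Claim_equal_trim_trailing_radio : Prop := ∀ (rows : List (List (String × String))), Dom_trim_trailing_radio rows → Pre_trim_trailing_radio rows → Spec_trim_trailing_radio rows (trim_trailing_radio rows)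

-- ===== LEMMAS AND PROOFS =====

-- If the backward scan found nothing among the first n rows, they are all RADIO_ID.
theorem pvLastIdxA_none {rows : List (List (String × String))} {n : Nat}
    (hn : n ≤ rows.length) (h : pvLastIdxA rows n = none) :
    ∀ j, (hj : j < n) → pvRowTy (rows[j]'(by omega)) = "RADIO_ID" := by
  induction n with
  | zero => intro j hj; omega
  | succ m ih =>
    intro j hj
    rw [pvLastIdxA] at h
    simp only [PySem.List.pyGet?_natCast] at h
    rw [List.getElem?_eq_getElem (show m < rows.length by omega)] at h
    simp only at h
    split_ifs at h with hty
    · by_cases hjm : j < m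
      · exact ih (by omega) h j hjm
      · have : j = m := by omega
        subst this
        simpa using hty

-- If the backward scan found li, it is below n.
theorem pvLastIdxA_lt {rows : List (List (String × String))} {n li : Nat}
    (h : pvLastIdxA rows n = some li) : li < n := by
  induction n with
  | zero => simp [pvLastIdxA] at h
  | succ m ih =>
    rw [pvLastIdxA] at h
    cases hg : PySem.List.pyGet? rows ((m : Int)) with
    | none => rw [hg] at h; simp only at h; have := ih h; omega
    | some r =>
      rw [hg] at h
      simp only at h
      split_ifs at h with hty
      · cases h; omega
      · have := ih h; omega

-- If the backward scan found li, row li is not RADIO_ID and all rows strictly between li and n are RADIO_ID.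
theorem pvLastIdxA_some {rows : List (List (String × String))} {n li : Nat}
    (hn : n ≤ rows.length) (h : pvLastIdxA rows n = some li) :
    pvRowTy (rows[li]'(by have := pvLastIdxA_lt h; omega)) ≠ "RADIO_ID" ∧
    ∀ j, li < j → (hj : j < n) → pvRowTy (rows[j]'(by omega)) = "RADIO_ID" := by
  induction n with
  | zero => simp [pvLastIdxA] at h
  | succ m ih =>
    rw [pvLastIdxA] at h
    simp only [PySem.List.pyGet?_natCast] at h
    rw [List.getElem?_eq_getElem (show m < rows.length by omega)] at h
    simp only at h
    split_ifs at h with hty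
    · cases h
      refine ⟨by simpa using hty, ?_⟩
      intro j hlt hj; omega
    · obtain ⟨h2, h3⟩ := ih (by omega) h
      refine ⟨h2, ?_⟩
      intro j hlt hj
      by_cases hjm : j < m
      · exact h3 j hlt hjm
      · have : j = m := by omega
        subst this
        simpa using hty

theorem filter_eq_nil_of_all_radio {rows : List (List (String × String))}
    (h : ∀ j, (hj : j < rows.length) → pvRowTy (rows[j]'hj) = "RADIO_ID") :
    rows.filter (fun r => pvRowTy r ≠ "RADIO_ID") = [] := by
  rw [List.filter_eq_nil_iff]
  intro r hr
  obtain ⟨j, hj, rfl⟩ := List.mem_iff_getElem.mp hr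
  simp [h j hj]

-- ===== VERDICT (by name: the statement is the Claim_ definition above) =====
theorem trim_trailing_radio_spec : Claim_equal_trim_trailing_radio := by
  intro rows _ _
  show trim_trailing_radio rows = trim_trailing_radio_alt rows
  unfold trim_trailing_radio trim_trailing_radio_alt
  cases hscan : pvLastIdxA rows rows.length with
  | none =>
    exact (filter_eq_nil_of_all_radio (pvLastIdxA_none le_rfl hscan)).symm
  | some li =>
    have hlt : li < rows.length := pvLastIdxA_lt hscan
    obtain ⟨_, hafter⟩ := pvLastIdxA_some le_rfl hscan
    have hslice : PySem.List.slice rows (some (0 : Int)) (some ((li : Int) + 1))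
        = rows.take (li + 1) := by
      have : ((li : Int) + 1) = ((li + 1 : Nat) : Int) := by push_cast; ring
      rw [this, PySem.List.slice_zero_start, PySem.List.slice_to_natCast]
    simp only [hslice]
    conv_rhs => rw [← List.take_append_drop (li + 1) rows, List.filter_append]
    have hdrop : (rows.drop (li + 1)).filter (fun r => pvRowTy r ≠ "RADIO_ID") = [] := by
      apply filter_eq_nil_of_all_radio
      intro j hj
      rw [List.getElem_drop]
      exact hafter (li + 1 + j) (by omega) (by simp at hj; omega)
    rw [hdrop, List.append_nil]
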